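-- pv_equiv track=rewrite | github.com/Nagavenkatasai7/assistant | src/utils/project_selector.py | extract_projects_from_profile
-- ===== SOURCE A (Python) =====
-- from typing import Dict, List, Tuple
--
-- def extract_projects_from_profile(profile_text: str) -> List[Dict]:
--     """
--     Extract individual projects from profile text
--
--     Args:
--         profile_text: Raw profile text
--
--     Returns:
--         List of project dictionaries with name and description
--     """
--     projects = []
--     lines = profile_text.split('\n')
--
--     current_project = None
--     current_description = []
--
--     for line in lines:
--         line_stripped = line.strip()
--
--         # Check if this is a project header (title with date or context)
--         # Look for patterns like "Project Name | Context" or "Project Name (Date)"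
--         if ('|' in line_stripped or
--             ('(' in line_stripped and ')' in line_stripped) or
--             (line_stripped and not line_stripped.startswith('-') and
--              any(keyword in line_stripped.lower() for keyword in
--                  ['project', 'platform', 'system', 'assistant', 'detection', 'published']))):
--
--             # Save previous project if exists
--             if current_project:
--                 projects.append({
--                     'name': current_project,
--                     'description': ' '.join(current_description)
--                 })
--
--             # Start new project
--             current_project = line_stripped
--             current_description = []
--
--         # Add description lines (bullets or paragraphs under project)
--         elif line_stripped.startswith('-') or (line_stripped and current_project):
--             current_description.append(line_stripped.lstrip('- '))
--
--     # Add last project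
--     if current_project:
--         projects.append({
--             'name': current_project,
--             'description': ' '.join(current_description)
--         })
--
--     return projects
-- ===== SOURCE B (Python) =====
-- from typing import Dict, List
--
-- _KEYWORDS = ['project', 'platform', 'system', 'assistant', 'detection', 'published']
--
--
-- def _is_header(s: str) -> bool:
--     return ('|' in s or ('(' in s and ')' in s) or
--             (bool(s) and not s.startswith('-') and
--              any(k in s.lower() for k in _KEYWORDS)))
--
--
-- def extract_projects_from_profile(profile_text: str) -> List[Dict]:
--     """Segment the profile into header-delimited sections in two passes."""
--     stripped = [ln.strip() for ln in profile_text.split('\n')]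
--     flags = [_is_header(s) for s in stripped]
--     n = len(stripped)
--     projects = []
--     i = 0
--     while i < n:
--         if not flags[i]:
--             i += 1
--             continue
--         j = i + 1
--         while j < n and not flags[j]:
--             j += 1
--         desc = ' '.join(s.lstrip('- ') for s in stripped[i + 1:j] if s)
--         projects.append({'name': stripped[i], 'description': desc})
--         i = j
--     return projects
-- ===== Notes on version B (the rewrite author's own statement) =====
-- stated objective: alternative
-- what changed: Replaces A's single pass that threads a (current_project, current_description) accumulator and flushes on each header with a two-pass segmentation: classify every stripped line as header/non-header first, then cut the line list into header-delimited sections and join each section's non-empty lines.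
import Mathlib
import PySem

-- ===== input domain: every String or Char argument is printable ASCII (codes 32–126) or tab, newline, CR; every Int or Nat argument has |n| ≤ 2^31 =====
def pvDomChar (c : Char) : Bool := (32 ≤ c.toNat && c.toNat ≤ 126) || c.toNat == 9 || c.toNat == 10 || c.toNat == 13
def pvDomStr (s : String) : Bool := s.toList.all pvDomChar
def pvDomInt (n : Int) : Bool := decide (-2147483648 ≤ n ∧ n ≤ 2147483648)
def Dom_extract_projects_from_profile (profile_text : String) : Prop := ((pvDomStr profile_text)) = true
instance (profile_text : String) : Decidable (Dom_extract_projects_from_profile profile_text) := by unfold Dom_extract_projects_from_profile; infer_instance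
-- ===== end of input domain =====

-- B replaces A's stateful single-pass accumulator with a two-pass segmentation
-- (classify every stripped line as header or not, then cut the line list into
-- header-delimited sections); same return value, different decomposition.


-- s.lstrip('- '): hand port (PySem has no left-only strip with a char set);
-- exact: drops leading characters that are '-' or ' '.
def pvLstrip (s : String) : String :=
  String.ofList (s.toList.dropWhile (fun c => c == '-' || c == ' '))

def pvKeywords : List String :=
  ["project", "platform", "system", "assistant", "detection", "published"]

-- ===== PORT A =====
-- current_project is Option String; it is never set to "" (the header test
-- fails on ""), so Python's truthiness `if current_project:` is `.isSome`.
def extract_projects_from_profile (profile_text : String) : List (List (String × String)) :=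
  let lines := (PySem.Str.split? profile_text "\n").getD []
  let st := lines.foldl
    (fun (st : List (List (String × String)) × Option String × List String) line =>
      let ls := PySem.Str.strip line
      if PySem.Str.isIn "|" ls ||
         (PySem.Str.isIn "(" ls && PySem.Str.isIn ")" ls) ||
         (ls != "" && !PySem.Str.startswith ls "-" &&
           pvKeywords.any (fun k => PySem.Str.isIn k (PySem.Str.lower ls))) then
        (match st.2.1 with
         | some name =>
             st.1 ++ [[("name", name), ("description", PySem.Str.join " " st.2.2)]]
         | none => st.1,
         some ls, [])
      else if PySem.Str.startswith ls "-" || (ls != "" && st.2.1.isSome) then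
        (st.1, st.2.1, st.2.2 ++ [pvLstrip ls])
      else st)
    ([], none, [])
  match st.2.1 with
  | some name => st.1 ++ [[("name", name), ("description", PySem.Str.join " " st.2.2)]]
  | none => st.1

-- ===== PORT B =====
def pvIsHeader (s : String) : Bool :=
  PySem.Str.isIn "|" s ||
  (PySem.Str.isIn "(" s && PySem.Str.isIn ")" s) ||
  (s != "" && !PySem.Str.startswith s "-" &&
    pvKeywords.any (fun k => PySem.Str.isIn k (PySem.Str.lower s)))

-- Source B's outer while loop = recursion on the remaining lines; its inner
-- `while j < n and not flags[j]` scan = takeWhile/dropWhile on the tail.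
def pvGroups : List String → List (List (String × String))
  | [] => []
  | s :: rest =>
    if pvIsHeader s then
      [("name", s),
       ("description", PySem.Str.join " "
         (((rest.takeWhile (fun t => !pvIsHeader t)).filter (fun t => t != "")).map pvLstrip))] ::
        pvGroups (rest.dropWhile (fun t => !pvIsHeader t))
    else pvGroups rest
termination_by ls => ls.length
decreasing_by
  · simpa using Nat.lt_succ_of_le (List.length_dropWhile_le _ _)
  · simp

def extract_projects_from_profile_alt (profile_text : String) : List (List (String × String)) :=
  pvGroups (((PySem.Str.split? profile_text "\n").getD []).map PySem.Str.strip)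

-- ===== PRECONDITION & SPEC =====
def Spec_extract_projects_from_profile (profile_text : String) (out : List (List (String × String))) : Prop := out = extract_projects_from_profile_alt profile_text
instance (profile_text : String) (out : List (List (String × String))) : Decidable (Spec_extract_projects_from_profile profile_text out) := by unfold Spec_extract_projects_from_profile; infer_instance

-- ===== CLAIM (what is proved, stated in full; the proofs are below) =====
def Claim_equal_extract_projects_from_profile : Prop := ∀ (profile_text : String), Dom_extract_projects_from_profile profile_text → Spec_extract_projects_from_profile profile_text (extract_projects_from_profile profile_text)

-- ===== LEMMAS AND PROOFS =====

-- A's loop body on an already-stripped line.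
def pvStep (st : List (List (String × String)) × Option String × List String)
    (ls : String) : List (List (String × String)) × Option String × List String :=
  if pvIsHeader ls then
    (match st.2.1 with
     | some name =>
         st.1 ++ [[("name", name), ("description", PySem.Str.join " " st.2.2)]]
     | none => st.1,
     some ls, [])
  else if PySem.Str.startswith ls "-" || (ls != "" && st.2.1.isSome) then
    (st.1, st.2.1, st.2.2 ++ [pvLstrip ls])
  else st

def pvFinish (st : List (List (String × String)) × Option String × List String) :
    List (List (String × String)) :=
  match st.2.1 with
  | some name => st.1 ++ [[("name", name), ("description", PySem.Str.join " " st.2.2)]]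
  | none => st.1

def pvRec (name : String) (desc : List String) : List (String × String) :=
  [("name", name), ("description", PySem.Str.join " " desc)]

lemma pvA_eq (p : String) :
    extract_projects_from_profile p =
      pvFinish ((((PySem.Str.split? p "\n").getD []).map PySem.Str.strip).foldl pvStep ([], none, [])) := by
  rw [List.foldl_map]
  rfl

lemma pvGroups_cons_header {s : String} (rest : List String) (h : pvIsHeader s = true) :
    pvGroups (s :: rest) =
      pvRec s (((rest.takeWhile (fun t => !pvIsHeader t)).filter (fun t => t != "")).map pvLstrip) ::
        pvGroups (rest.dropWhile (fun t => !pvIsHeader t)) := by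
  rw [pvGroups, if_pos h]; rfl

lemma pvGroups_cons_nonheader {s : String} (rest : List String) (h : pvIsHeader s = false) :
    pvGroups (s :: rest) = pvGroups rest := by
  rw [pvGroups, if_neg (by simp [h])]


-- With a current project, from state (P, some name, desc) the loop emits
-- name with desc ++ the section body, then behaves like the fresh scan.
lemma pvFold_some (ls : List String) :
    ∀ (P : List (List (String × String))) (name : String) (desc : List String),
      pvFinish (ls.foldl pvStep (P, some name, desc)) =
        P ++ pvRec name (desc ++ ((ls.takeWhile (fun t => !pvIsHeader t)).filter (fun t => t != "")).map pvLstrip) ::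
          pvGroups (ls.dropWhile (fun t => !pvIsHeader t)) := by
  induction ls with
  | nil => intro P name desc; simp [pvFinish, pvRec, pvGroups]
  | cons s t ih =>
    intro P name desc
    by_cases h : pvIsHeader s = true
    · rw [List.foldl_cons]
      have hs : pvStep (P, some name, desc) s = (P ++ [pvRec name desc], some s, []) := by
        simp [pvStep, h, pvRec]
      rw [hs, ih]
      rw [List.takeWhile_cons, List.dropWhile_cons]
      simp [h, pvGroups_cons_header t h, pvRec]
    · rw [Bool.not_eq_true] at h
      rw [List.foldl_cons]
      rw [List.takeWhile_cons, List.dropWhile_cons]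
      by_cases he : s = ""
      · subst he
        have hs : pvStep (P, some name, desc) "" = (P, some name, desc) := by
          simp [pvStep, h]
          decide
        rw [hs, ih]
        simp [h]
      · have hs : pvStep (P, some name, desc) s = (P, some name, desc ++ [pvLstrip s]) := by
          simp [pvStep, h, he]
        rw [hs, ih]
        simp [h, he]

-- From state (P, none, desc) the loop produces exactly P ++ the sections.
lemma pvFold_none (ls : List String) :
    ∀ (P : List (List (String × String))) (desc : List String),
      pvFinish (ls.foldl pvStep (P, none, desc)) = P ++ pvGroups ls := by
  induction ls with
  | nil => intro P desc; simp [pvFinish, pvGroups]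
  | cons s t ih =>
    intro P desc
    by_cases h : pvIsHeader s = true
    · rw [List.foldl_cons]
      have hs : pvStep (P, none, desc) s = (P, some s, []) := by
        simp [pvStep, h]
      rw [hs, pvFold_some, pvGroups_cons_header t h]
      simp
    · rw [Bool.not_eq_true] at h
      rw [List.foldl_cons, pvGroups_cons_nonheader t h]
      by_cases hd : PySem.Str.startswith s "-" = true
      · have hs : pvStep (P, none, desc) s = (P, none, desc ++ [pvLstrip s]) := by
          simp [pvStep, h]
          simpa using hd
        rw [hs, ih]
      · have hs : pvStep (P, none, desc) s = (P, none, desc) := by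
          simp [pvStep, h]
          simpa using hd
        rw [hs, ih]

-- ===== VERDICT (by name: the statement is the Claim_ definition above) =====
theorem extract_projects_from_profile_spec : Claim_equal_extract_projects_from_profile := by
  intro p _
  show extract_projects_from_profile p = extract_projects_from_profile_alt p
  rw [pvA_eq, pvFold_none]
  rfl
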